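-- pv_equiv track=rewrite | github.com/garrypolley/emoji_copy | generate_emojis.py | get_category_from_name
-- ===== SOURCE A (Python) =====
-- def get_category_from_name(emoji_name):
--     """Get category based on emoji name."""
--     name = emoji_name.lower()
--
--     if any(x in name for x in ['face', 'smile', 'grin', 'laugh', 'cry', 'eye', 'mouth']):
--         return "Smileys & Emotions"
--     elif any(x in name for x in ['animal', 'cat', 'dog', 'bird', 'monkey', 'bear', 'panda', 'fish', 'bug', 'butterfly', 'lion', 'tiger', 'whale', 'shark', 'snake', 'frog', 'penguin']):
--         return "Animals & Nature"
--     elif any(x in name for x in ['plant', 'tree', 'flower', 'leaf', 'mushroom', 'cactus', 'herb', 'clover']):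
--         return "Animals & Nature"
--     elif any(x in name for x in ['food', 'fruit', 'pizza', 'burger', 'rice', 'bread', 'apple', 'orange', 'banana', 'watermelon', 'grape', 'strawberry', 'meat', 'cake', 'candy', 'coffee', 'beer', 'wine']):
--         return "Food & Drink"
--     elif any(x in name for x in ['car', 'train', 'bus', 'airplane', 'rocket', 'ship', 'boat', 'bicycle', 'motorcycle', 'taxi', 'truck', 'travel']):
--         return "Travel & Places"
--     elif any(x in name for x in ['flag', 'country']):
--         return "Flags"
--     elif any(x in name for x in ['heart', 'star', 'diamond', 'gem', 'sparkle', 'sun', 'moon', 'cloud', 'fire', 'water', 'arrow', 'check', 'cross']):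
--         return "Symbols"
--     else:
--         return "Symbols"
-- ===== SOURCE B (Python) =====
-- # Multi-pattern scan of the name: walk every start position once and keep the
-- # minimum-rank keyword that STARTS there (rank = branch precedence), instead of
-- # running a separate substring search per category list (objective: alternative).
-- WORD_GROUPS = [
--     ['face', 'smile', 'grin', 'laugh', 'cry', 'eye', 'mouth'],
--     ['animal', 'cat', 'dog', 'bird', 'monkey', 'bear', 'panda', 'fish', 'bug',
--      'butterfly', 'lion', 'tiger', 'whale', 'shark', 'snake', 'frog', 'penguin'],
--     ['plant', 'tree', 'flower', 'leaf', 'mushroom', 'cactus', 'herb', 'clover'],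
--     ['food', 'fruit', 'pizza', 'burger', 'rice', 'bread', 'apple', 'orange',
--      'banana', 'watermelon', 'grape', 'strawberry', 'meat', 'cake', 'candy',
--      'coffee', 'beer', 'wine'],
--     ['car', 'train', 'bus', 'airplane', 'rocket', 'ship', 'boat', 'bicycle',
--      'motorcycle', 'taxi', 'truck', 'travel'],
--     ['flag', 'country'],
-- ]
-- CATEGORY_OF_RANK = ["Smileys & Emotions", "Animals & Nature", "Animals & Nature",
--                     "Food & Drink", "Travel & Places", "Flags", "Symbols"]
-- KEYWORD_RANKS = [(w, r) for r, ws in enumerate(WORD_GROUPS) for w in ws]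
--
--
-- def get_category_from_name(emoji_name):
--     """Get category based on emoji name."""
--     name = emoji_name.lower()
--     best = 6
--     for i in range(len(name)):
--         for w, r in KEYWORD_RANKS:
--             if r < best and name.startswith(w, i):
--                 best = r
--     return CATEGORY_OF_RANK[best]
-- ===== Notes on version B (the rewrite author's own statement) =====
-- stated objective: alternative
-- what changed: Replaces the per-category any(keyword in name) substring searches of the if/elif chain with a single multi-pattern scan: one (keyword, rank) table, one pass over the start positions of the lowercased name keeping the minimum rank of any keyword starting there, and a final rank-to-category lookup with rank 6 as the Symbols default.
import Mathlib
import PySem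

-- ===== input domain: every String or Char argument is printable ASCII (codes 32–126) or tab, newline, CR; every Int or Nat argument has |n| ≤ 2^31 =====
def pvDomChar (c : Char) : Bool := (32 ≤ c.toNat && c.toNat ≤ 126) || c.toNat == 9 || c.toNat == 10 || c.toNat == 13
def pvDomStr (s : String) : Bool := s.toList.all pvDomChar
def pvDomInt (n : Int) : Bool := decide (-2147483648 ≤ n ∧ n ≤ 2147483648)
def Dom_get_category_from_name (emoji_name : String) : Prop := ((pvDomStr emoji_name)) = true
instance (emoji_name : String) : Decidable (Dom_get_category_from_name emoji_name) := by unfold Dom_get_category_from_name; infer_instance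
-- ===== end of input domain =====

-- B replaces A's per-category substring searches with one multi-pattern scan over
-- the name's start positions keeping the minimum-rank keyword (objective: alternative).

-- ===== PORT A =====
def get_category_from_name (emoji_name : String) : String :=
  let name := PySem.Str.lower emoji_name
  if (["face", "smile", "grin", "laugh", "cry", "eye", "mouth"].any
        (fun x => PySem.Str.isIn x name)) then
    "Smileys & Emotions"
  else if (["animal", "cat", "dog", "bird", "monkey", "bear", "panda", "fish", "bug",
            "butterfly", "lion", "tiger", "whale", "shark", "snake", "frog", "penguin"].any
        (fun x => PySem.Str.isIn x name)) then
    "Animals & Nature"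
  else if (["plant", "tree", "flower", "leaf", "mushroom", "cactus", "herb", "clover"].any
        (fun x => PySem.Str.isIn x name)) then
    "Animals & Nature"
  else if (["food", "fruit", "pizza", "burger", "rice", "bread", "apple", "orange",
            "banana", "watermelon", "grape", "strawberry", "meat", "cake", "candy",
            "coffee", "beer", "wine"].any
        (fun x => PySem.Str.isIn x name)) then
    "Food & Drink"
  else if (["car", "train", "bus", "airplane", "rocket", "ship", "boat", "bicycle",
            "motorcycle", "taxi", "truck", "travel"].any
        (fun x => PySem.Str.isIn x name)) then
    "Travel & Places"
  else if (["flag", "country"].any (fun x => PySem.Str.isIn x name)) then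
    "Flags"
  else if (["heart", "star", "diamond", "gem", "sparkle", "sun", "moon", "cloud",
            "fire", "water", "arrow", "check", "cross"].any
        (fun x => PySem.Str.isIn x name)) then
    "Symbols"
  else
    "Symbols"

-- ===== PORT B =====
def wordGroups : List (List String) :=
  [["face", "smile", "grin", "laugh", "cry", "eye", "mouth"],
   ["animal", "cat", "dog", "bird", "monkey", "bear", "panda", "fish", "bug",
    "butterfly", "lion", "tiger", "whale", "shark", "snake", "frog", "penguin"],
   ["plant", "tree", "flower", "leaf", "mushroom", "cactus", "herb", "clover"],
   ["food", "fruit", "pizza", "burger", "rice", "bread", "apple", "orange",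
    "banana", "watermelon", "grape", "strawberry", "meat", "cake", "candy",
    "coffee", "beer", "wine"],
   ["car", "train", "bus", "airplane", "rocket", "ship", "boat", "bicycle",
    "motorcycle", "taxi", "truck", "travel"],
   ["flag", "country"]]

def categoryOfRank : List String :=
  ["Smileys & Emotions", "Animals & Nature", "Animals & Nature",
   "Food & Drink", "Travel & Places", "Flags", "Symbols"]

def keywordRanks : List (String × Int) :=
  (PySem.List.enumerate wordGroups).flatMap (fun p => p.2.map (fun w => (w, p.1)))

-- name.startswith(w, i) with 0 ≤ i ≤ len(name) is exactly startswith of the i-th suffix;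
-- innerStep is the body of the inner `for w, r in KEYWORD_RANKS` loop
def innerStep (l : List Char) (b : Int) (wr : String × Int) : Int :=
  if wr.2 < b && PySem.Chars.startswith l wr.1.toList then wr.2 else b

def get_category_from_name_alt (emoji_name : String) : String :=
  let name := (PySem.Str.lower emoji_name).toList
  let best : Int := (List.range name.length).foldl
      (fun b i => keywordRanks.foldl (innerStep (name.drop i)) b)
      6
  -- best always lies in [0, 6], so the .getD default is never used (Python indexing is in range)
  (PySem.List.pyGet? categoryOfRank best).getD ""

-- ===== PRECONDITION & SPEC =====
def Spec_get_category_from_name (emoji_name : String) (out : String) : Prop := out = get_category_from_name_alt emoji_name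
instance (emoji_name : String) (out : String) : Decidable (Spec_get_category_from_name emoji_name out) := by unfold Spec_get_category_from_name; infer_instance

-- ===== CLAIM (what is proved, stated in full; the proofs are below) =====
def Claim_equal_get_category_from_name : Prop := ∀ (emoji_name : String), Dom_get_category_from_name emoji_name → Spec_get_category_from_name emoji_name (get_category_from_name emoji_name)

-- ===== LEMMAS AND PROOFS =====

def Matched (l : List Char) (r : Int) : Prop :=
  ∃ w : String, (w, r) ∈ keywordRanks ∧ PySem.Chars.isIn w.toList l = true

lemma inner_le (t : List (String × Int)) (l : List Char) (b : Int) :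
    t.foldl (innerStep l) b ≤ b := by
  induction t generalizing b with
  | nil => simp
  | cons wr t ih =>
      simp only [List.foldl_cons]
      refine le_trans (ih _) ?_
      unfold innerStep; split_ifs with h
      · exact le_of_lt (by simpa using ((Bool.and_eq_true _ _).mp h).1)
      · exact le_refl _

lemma inner_le_of_mem (t : List (String × Int)) (l : List Char) (b : Int)
    (wr : String × Int) (hm : wr ∈ t)
    (hs : PySem.Chars.startswith l wr.1.toList = true) :
    t.foldl (innerStep l) b ≤ wr.2 := by
  induction t generalizing b with
  | nil => simp at hm
  | cons x t ih =>
      simp only [List.foldl_cons]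
      rcases List.mem_cons.mp hm with h | h
      · subst h
        refine le_trans (inner_le t l _) ?_
        simp only [innerStep, hs, Bool.and_true, decide_eq_true_eq]
        split_ifs with h2 <;> omega
      · exact ih _ h

lemma inner_cases (t : List (String × Int)) (l : List Char) (b : Int) :
    t.foldl (innerStep l) b = b ∨
      ∃ wr ∈ t, PySem.Chars.startswith l wr.1.toList = true ∧
        t.foldl (innerStep l) b = wr.2 := by
  induction t generalizing b with
  | nil => left; simp
  | cons x t ih =>
      simp only [List.foldl_cons]
      rcases ih (innerStep l b x) with h | ⟨wr, hm, hs, he⟩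
      · by_cases hc : (decide (x.2 < b) && PySem.Chars.startswith l x.1.toList) = true
        · right
          refine ⟨x, List.mem_cons_self .., ((Bool.and_eq_true _ _).mp hc).2, ?_⟩
          rw [h]; simp [innerStep, hc]
        · left; rw [h]; simp only [innerStep]
          rw [if_neg (by simpa using hc)]
      · right; exact ⟨wr, List.mem_cons_of_mem _ hm, hs, he⟩

lemma outer_le (is : List Nat) (l : List Char) (b : Int) :
    is.foldl (fun b i => keywordRanks.foldl (innerStep (l.drop i)) b) b ≤ b := by
  induction is generalizing b with
  | nil => simp
  | cons i is ih =>
      simp only [List.foldl_cons]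
      exact le_trans (ih _) (inner_le _ _ _)

lemma outer_le_of_mem (is : List Nat) (l : List Char) (b : Int)
    (i : Nat) (hi : i ∈ is) (wr : String × Int) (hm : wr ∈ keywordRanks)
    (hs : PySem.Chars.startswith (l.drop i) wr.1.toList = true) :
    is.foldl (fun b i => keywordRanks.foldl (innerStep (l.drop i)) b) b ≤ wr.2 := by
  induction is generalizing b with
  | nil => simp at hi
  | cons j is ih =>
      simp only [List.foldl_cons]
      rcases List.mem_cons.mp hi with h | h
      · subst h
        exact le_trans (outer_le is l _) (inner_le_of_mem _ _ _ _ hm hs)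
      · exact ih _ h

lemma outer_cases (is : List Nat) (l : List Char) (b : Int) :
    is.foldl (fun b i => keywordRanks.foldl (innerStep (l.drop i)) b) b = b ∨
      ∃ i ∈ is, ∃ wr ∈ keywordRanks,
        PySem.Chars.startswith (l.drop i) wr.1.toList = true ∧
        is.foldl (fun b i => keywordRanks.foldl (innerStep (l.drop i)) b) b = wr.2 := by
  induction is generalizing b with
  | nil => left; simp
  | cons j is ih =>
      simp only [List.foldl_cons]
      rcases ih (keywordRanks.foldl (innerStep (l.drop j)) b) with h | ⟨i, hi, wr, hm, hs, he⟩
      · rcases inner_cases keywordRanks (l.drop j) b with h2 | ⟨wr, hm, hs, he⟩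
        · left; rw [h, h2]
        · right; exact ⟨j, List.mem_cons_self .., wr, hm, hs, by rw [h, he]⟩
      · right; exact ⟨i, List.mem_cons_of_mem _ hi, wr, hm, hs, he⟩

-- keywordRanks is the literal table; membership characterised per rank
lemma keywordRanks_eq : keywordRanks =
    (["face", "smile", "grin", "laugh", "cry", "eye", "mouth"].map (fun w => (w, (0 : Int)))) ++
    (["animal", "cat", "dog", "bird", "monkey", "bear", "panda", "fish", "bug",
      "butterfly", "lion", "tiger", "whale", "shark", "snake", "frog", "penguin"].map (fun w => (w, (1 : Int)))) ++
    (["plant", "tree", "flower", "leaf", "mushroom", "cactus", "herb", "clover"].map (fun w => (w, (2 : Int)))) ++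
    (["food", "fruit", "pizza", "burger", "rice", "bread", "apple", "orange",
      "banana", "watermelon", "grape", "strawberry", "meat", "cake", "candy",
      "coffee", "beer", "wine"].map (fun w => (w, (3 : Int)))) ++
    (["car", "train", "bus", "airplane", "rocket", "ship", "boat", "bicycle",
      "motorcycle", "taxi", "truck", "travel"].map (fun w => (w, (4 : Int)))) ++
    (["flag", "country"].map (fun w => (w, (5 : Int)))) := by
  rfl

lemma mem_keywordRanks (w : String) (r : Int) :
    (w, r) ∈ keywordRanks ↔
      (w ∈ ["face", "smile", "grin", "laugh", "cry", "eye", "mouth"] ∧ r = 0) ∨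
      (w ∈ ["animal", "cat", "dog", "bird", "monkey", "bear", "panda", "fish", "bug",
            "butterfly", "lion", "tiger", "whale", "shark", "snake", "frog", "penguin"] ∧ r = 1) ∨
      (w ∈ ["plant", "tree", "flower", "leaf", "mushroom", "cactus", "herb", "clover"] ∧ r = 2) ∨
      (w ∈ ["food", "fruit", "pizza", "burger", "rice", "bread", "apple", "orange",
            "banana", "watermelon", "grape", "strawberry", "meat", "cake", "candy",
            "coffee", "beer", "wine"] ∧ r = 3) ∨
      (w ∈ ["car", "train", "bus", "airplane", "rocket", "ship", "boat", "bicycle",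
            "motorcycle", "taxi", "truck", "travel"] ∧ r = 4) ∨
      (w ∈ ["flag", "country"] ∧ r = 5) := by
  rw [keywordRanks_eq]
  simp only [List.mem_append, List.mem_map, Prod.mk.injEq]
  constructor
  · rintro ((((((⟨a, ha, rfl, rfl⟩ | ⟨a, ha, rfl, rfl⟩) | ⟨a, ha, rfl, rfl⟩) |
      ⟨a, ha, rfl, rfl⟩) | ⟨a, ha, rfl, rfl⟩) | ⟨a, ha, rfl, rfl⟩)) <;> tauto
  · rintro (⟨h, rfl⟩ | ⟨h, rfl⟩ | ⟨h, rfl⟩ | ⟨h, rfl⟩ | ⟨h, rfl⟩ | ⟨h, rfl⟩)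
    · exact Or.inl (Or.inl (Or.inl (Or.inl (Or.inl ⟨w, h, rfl, rfl⟩))))
    · exact Or.inl (Or.inl (Or.inl (Or.inl (Or.inr ⟨w, h, rfl, rfl⟩))))
    · exact Or.inl (Or.inl (Or.inl (Or.inr ⟨w, h, rfl, rfl⟩)))
    · exact Or.inl (Or.inl (Or.inr ⟨w, h, rfl, rfl⟩))
    · exact Or.inl (Or.inr ⟨w, h, rfl, rfl⟩)
    · exact Or.inr ⟨w, h, rfl, rfl⟩

lemma keyword_ne_nil (w : String) (r : Int) (h : (w, r) ∈ keywordRanks) : w.toList ≠ [] := by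
  have hall : keywordRanks.all (fun p => decide (p.1.toList ≠ [])) = true := by decide
  simpa using List.all_eq_true.mp hall (w, r) h

lemma matched_le (l : List Char) (r : Int) (h : Matched l r) :
    (List.range l.length).foldl (fun b i => keywordRanks.foldl (innerStep (l.drop i)) b) 6 ≤ r := by
  obtain ⟨w, hm, hin⟩ := h
  obtain ⟨j, hj⟩ := (PySem.Chars.exists_prefix_drop_iff_isIn w.toList l).mpr hin
  have hjlt : j < l.length := by
    by_contra hge
    have : l.drop j = [] := List.drop_eq_nil_of_le (by omega)
    rw [this] at hj
    exact keyword_ne_nil w r hm (List.prefix_nil.mp hj)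
  exact outer_le_of_mem _ l 6 j (List.mem_range.mpr hjlt) (w, r) hm
    ((PySem.Chars.startswith_iff _ _).mpr hj)

lemma best_cases (l : List Char) :
    (List.range l.length).foldl (fun b i => keywordRanks.foldl (innerStep (l.drop i)) b) 6 = 6 ∨
      Matched l ((List.range l.length).foldl (fun b i => keywordRanks.foldl (innerStep (l.drop i)) b) 6) := by
  rcases outer_cases (List.range l.length) l 6 with h | ⟨i, _, wr, hm, hs, he⟩
  · left; exact h
  · right
    rw [he]
    refine ⟨wr.1, hm, ?_⟩
    exact (PySem.Chars.exists_prefix_drop_iff_isIn wr.1.toList l).mp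
      ⟨i, (PySem.Chars.startswith_iff _ _).mp hs⟩

lemma matched_g0 (l : List Char) :
    Matched l 0 ↔
      (["face", "smile", "grin", "laugh", "cry", "eye", "mouth"].any (fun x => PySem.Chars.isIn x.toList l)) = true := by
  simp [Matched, mem_keywordRanks]

lemma matched_g1 (l : List Char) :
    Matched l 1 ↔
      (["animal", "cat", "dog", "bird", "monkey", "bear", "panda", "fish", "bug",
      "butterfly", "lion", "tiger", "whale", "shark", "snake", "frog", "penguin"].any (fun x => PySem.Chars.isIn x.toList l)) = true := by
  simp [Matched, mem_keywordRanks]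

lemma matched_g2 (l : List Char) :
    Matched l 2 ↔
      (["plant", "tree", "flower", "leaf", "mushroom", "cactus", "herb", "clover"].any (fun x => PySem.Chars.isIn x.toList l)) = true := by
  simp [Matched, mem_keywordRanks]

lemma matched_g3 (l : List Char) :
    Matched l 3 ↔
      (["food", "fruit", "pizza", "burger", "rice", "bread", "apple", "orange",
      "banana", "watermelon", "grape", "strawberry", "meat", "cake", "candy",
      "coffee", "beer", "wine"].any (fun x => PySem.Chars.isIn x.toList l)) = true := by
  simp [Matched, mem_keywordRanks]

lemma matched_g4 (l : List Char) :
    Matched l 4 ↔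
      (["car", "train", "bus", "airplane", "rocket", "ship", "boat", "bicycle",
      "motorcycle", "taxi", "truck", "travel"].any (fun x => PySem.Chars.isIn x.toList l)) = true := by
  simp [Matched, mem_keywordRanks]

lemma matched_g5 (l : List Char) :
    Matched l 5 ↔
      (["flag", "country"].any (fun x => PySem.Chars.isIn x.toList l)) = true := by
  simp [Matched, mem_keywordRanks]

lemma matched_rank (l : List Char) (r : Int) (h : Matched l r) :
    r = 0 ∨ r = 1 ∨ r = 2 ∨ r = 3 ∨ r = 4 ∨ r = 5 := by
  obtain ⟨w, hm, _⟩ := h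
  rcases (mem_keywordRanks w r).mp hm with ⟨_, h⟩ | ⟨_, h⟩ | ⟨_, h⟩ | ⟨_, h⟩ | ⟨_, h⟩ | ⟨_, h⟩ <;> tauto

-- ===== VERDICT (by name: the statement is the Claim_ definition above) =====
theorem get_category_from_name_spec : Claim_equal_get_category_from_name := by
  intro emoji_name _
  unfold Spec_get_category_from_name
  simp only [get_category_from_name, get_category_from_name_alt, PySem.Str.isIn_eq]
  set l := (PySem.Str.lower emoji_name).toList with hl
  set m := (List.range l.length).foldl (fun b i => keywordRanks.foldl (innerStep (l.drop i)) b) 6 with hmdef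
  have hle : m ≤ 6 := outer_le _ _ _
  have hcases := best_cases l
  rw [← hmdef] at hcases
  have hmle : ∀ r, Matched l r → m ≤ r := fun r h => by
    have := matched_le l r h; rwa [← hmdef] at this
  split_ifs with h0 h1 h2 h3 h4 h5 h6
  · -- rank 0
    have hm0 : m = 0 := le_antisymm (hmle 0 ((matched_g0 l).mpr h0)) (by
      rcases hcases with h | hM
      · omega
      · rcases matched_rank l m hM with h|h|h|h|h|h <;> omega)
    rw [hm0]; rfl
  · have hub : m ≤ 1 := hmle 1 ((matched_g1 l).mpr h1)
    have hm1 : m = 1 := by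
      rcases hcases with h | hM
      · omega
      · rcases matched_rank l m hM with h|h|h|h|h|h
        · exact absurd ((matched_g0 l).mp (h ▸ hM)) h0
        all_goals omega
    rw [hm1]; rfl
  · have hub : m ≤ 2 := hmle 2 ((matched_g2 l).mpr h2)
    have hm2 : m = 2 := by
      rcases hcases with h | hM
      · omega
      · rcases matched_rank l m hM with h|h|h|h|h|h
        · exact absurd ((matched_g0 l).mp (h ▸ hM)) h0
        · exact absurd ((matched_g1 l).mp (h ▸ hM)) h1
        all_goals omega
    rw [hm2]; rfl
  · have hub : m ≤ 3 := hmle 3 ((matched_g3 l).mpr h3)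
    have hm3 : m = 3 := by
      rcases hcases with h | hM
      · omega
      · rcases matched_rank l m hM with h|h|h|h|h|h
        · exact absurd ((matched_g0 l).mp (h ▸ hM)) h0
        · exact absurd ((matched_g1 l).mp (h ▸ hM)) h1
        · exact absurd ((matched_g2 l).mp (h ▸ hM)) h2
        all_goals omega
    rw [hm3]; rfl
  · have hub : m ≤ 4 := hmle 4 ((matched_g4 l).mpr h4)
    have hm4 : m = 4 := by
      rcases hcases with h | hM
      · omega
      · rcases matched_rank l m hM with h|h|h|h|h|h
        · exact absurd ((matched_g0 l).mp (h ▸ hM)) h0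
        · exact absurd ((matched_g1 l).mp (h ▸ hM)) h1
        · exact absurd ((matched_g2 l).mp (h ▸ hM)) h2
        · exact absurd ((matched_g3 l).mp (h ▸ hM)) h3
        all_goals omega
    rw [hm4]; rfl
  · have hub : m ≤ 5 := hmle 5 ((matched_g5 l).mpr h5)
    have hm5 : m = 5 := by
      rcases hcases with h | hM
      · omega
      · rcases matched_rank l m hM with h|h|h|h|h|h
        · exact absurd ((matched_g0 l).mp (h ▸ hM)) h0
        · exact absurd ((matched_g1 l).mp (h ▸ hM)) h1
        · exact absurd ((matched_g2 l).mp (h ▸ hM)) h2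
        · exact absurd ((matched_g3 l).mp (h ▸ hM)) h3
        · exact absurd ((matched_g4 l).mp (h ▸ hM)) h4
        all_goals omega
    rw [hm5]; rfl
  · -- symbols keyword branch: none of groups 0-5 matched, so m = 6
    have hm6 : m = 6 := by
      rcases hcases with h | hM
      · exact h
      · rcases matched_rank l m hM with h|h|h|h|h|h
        · exact absurd ((matched_g0 l).mp (h ▸ hM)) h0
        · exact absurd ((matched_g1 l).mp (h ▸ hM)) h1
        · exact absurd ((matched_g2 l).mp (h ▸ hM)) h2
        · exact absurd ((matched_g3 l).mp (h ▸ hM)) h3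
        · exact absurd ((matched_g4 l).mp (h ▸ hM)) h4
        · exact absurd ((matched_g5 l).mp (h ▸ hM)) h5
    rw [hm6]; rfl
  · have hm6 : m = 6 := by
      rcases hcases with h | hM
      · exact h
      · rcases matched_rank l m hM with h|h|h|h|h|h
        · exact absurd ((matched_g0 l).mp (h ▸ hM)) h0
        · exact absurd ((matched_g1 l).mp (h ▸ hM)) h1
        · exact absurd ((matched_g2 l).mp (h ▸ hM)) h2
        · exact absurd ((matched_g3 l).mp (h ▸ hM)) h3
        · exact absurd ((matched_g4 l).mp (h ▸ hM)) h4
        · exact absurd ((matched_g5 l).mp (h ▸ hM)) h5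
    rw [hm6]; rfl
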